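-- pv_equiv track=rewrite | github.com/SimulationEverywhere/covid_cell_devs | notebooks/epidemic_plots_from_cd_log.py | dict_to_states_row
-- ===== SOURCE A (Python) =====
-- ID_SUSCEPTIBLE = 0
--
-- ID_INFECTED = 1
--
-- ID_SICK = 8
--
-- ID_RECOVERED = 16
--
-- ID_DEAD = -1
--
-- ID_WALL = -10
--
-- def dict_to_states_row(states_dict):
--   row = []
--   row.append(states_dict[ID_SUSCEPTIBLE] if ID_SUSCEPTIBLE in states_dict else 0)
--
--   infected_count = 0
--   for state in range(ID_INFECTED, ID_SICK):
--     if state in states_dict: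
--       infected_count += states_dict[state]
--   row.append(infected_count)
--
--   sick_count = 0
--   for state in range(ID_SICK, ID_RECOVERED):
--     if state in states_dict:
--       sick_count += states_dict[state]
--   row.append(sick_count)
--
--   for state in [ID_RECOVERED, ID_DEAD, ID_WALL]:
--     row.append(states_dict[state] if state in states_dict else 0)
--   return row
-- ===== SOURCE B (Python) =====
-- def dict_to_states_row(states_dict):
--     row = [0, 0, 0, 0, 0, 0]
--     for key, value in states_dict.items():
--         if key == 0:
--             row[0] += value
--         elif 1 <= key < 8:
--             row[1] += value
--         elif 8 <= key < 16:
--             row[2] += value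
--         elif key == 16:
--             row[3] += value
--         elif key == -1:
--             row[4] += value
--         elif key == -10:
--             row[5] += value
--     return row
-- ===== Notes on version B (the rewrite author's own statement) =====
-- stated objective: alternative
-- what changed: Replaces A's two fixed-range scans plus four per-slot lookups with a single data-driven pass over states_dict.items() that classifies each key into one of six accumulator slots.
import Mathlib
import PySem

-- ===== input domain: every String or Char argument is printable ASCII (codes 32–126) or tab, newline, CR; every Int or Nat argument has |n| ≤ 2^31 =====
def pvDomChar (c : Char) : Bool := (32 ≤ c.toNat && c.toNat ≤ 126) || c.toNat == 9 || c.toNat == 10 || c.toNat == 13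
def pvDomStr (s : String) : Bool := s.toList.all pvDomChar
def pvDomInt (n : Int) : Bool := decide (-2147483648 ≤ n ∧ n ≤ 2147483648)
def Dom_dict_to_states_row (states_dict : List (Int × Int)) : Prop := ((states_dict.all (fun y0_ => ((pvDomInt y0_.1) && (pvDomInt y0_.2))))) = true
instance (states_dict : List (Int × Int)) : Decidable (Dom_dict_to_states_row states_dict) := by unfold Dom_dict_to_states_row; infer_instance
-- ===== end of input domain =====

-- B replaces A's fixed-range scans and per-slot lookups by one classification pass over the
-- dict items into a six-slot accumulator (objective: alternative decomposition, same cost).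

-- ===== PORT A =====
-- `state in states_dict` / `states_dict[state]`: Python dict membership/lookup = first match
-- on the association list, ported exactly by List.lookup.
def dict_to_states_row (states_dict : List (Int × Int)) : List Int :=
  let row : List Int := [(states_dict.lookup 0).getD 0]
  let infected_count : Int := (PySem.List.pyRange 1 8 1).foldl
    (fun acc state => if (states_dict.lookup state).isSome
                      then acc + (states_dict.lookup state).getD 0 else acc) 0
  let row := row ++ [infected_count]
  let sick_count : Int := (PySem.List.pyRange 8 16 1).foldl
    (fun acc state => if (states_dict.lookup state).isSome
                      then acc + (states_dict.lookup state).getD 0 else acc) 0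
  let row := row ++ [sick_count]
  let row := [(16 : Int), -1, -10].foldl
    (fun r state => r ++ [(states_dict.lookup state).getD 0]) row
  row

-- ===== PORT B =====
-- one classification step of Source B's loop (the mutable six-slot row is the tuple)
def bStep (row : Int × Int × Int × Int × Int × Int) (kv : Int × Int) :
    Int × Int × Int × Int × Int × Int :=
  let (s, i, k, r, d, w) := row
  let (key, value) := kv
  if key = 0 then (s + value, i, k, r, d, w)
  else if 1 ≤ key ∧ key < 8 then (s, i + value, k, r, d, w)
  else if 8 ≤ key ∧ key < 16 then (s, i, k + value, r, d, w)
  else if key = 16 then (s, i, k, r + value, d, w)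
  else if key = -1 then (s, i, k, r, d + value, w)
  else if key = -10 then (s, i, k, r, d, w + value)
  else (s, i, k, r, d, w)

def dict_to_states_row_alt (states_dict : List (Int × Int)) : List Int :=
  let (s, i, k, r, d, w) := states_dict.foldl bStep (0, 0, 0, 0, 0, 0)
  [s, i, k, r, d, w]

-- ===== PRECONDITION & SPEC =====
-- Pre_ excludes association lists with duplicate keys: a Python dict cannot contain them, so
-- they represent no Python input; on them A's first-match lookup and B's summing pass are
-- both accidental.
def Pre_dict_to_states_row (states_dict : List (Int × Int)) : Prop :=
  (states_dict.map Prod.fst).Nodup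
instance (states_dict : List (Int × Int)) : Decidable (Pre_dict_to_states_row states_dict) := by
  unfold Pre_dict_to_states_row; infer_instance
def pvWitness_dict_to_states_row : (List (Int × Int)) := [(0, 3), (5, 2), (9, 1), (16, 4), (-1, 1), (-10, 7), (20, 9)]

def Spec_dict_to_states_row (states_dict : List (Int × Int)) (out : List Int) : Prop := out = dict_to_states_row_alt states_dict
instance (states_dict : List (Int × Int)) (out : List Int) : Decidable (Spec_dict_to_states_row states_dict out) := by unfold Spec_dict_to_states_row; infer_instance

-- ===== CLAIM (what is proved, stated in full; the proofs are below) =====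
def Claim_equal_dict_to_states_row : Prop := ∀ (states_dict : List (Int × Int)), Dom_dict_to_states_row states_dict → Pre_dict_to_states_row states_dict → Spec_dict_to_states_row states_dict (dict_to_states_row states_dict)

-- ===== LEMMAS AND PROOFS =====

-- sum of the values of the entries whose key satisfies p
def catSum (p : Int → Prop) [DecidablePred p] : List (Int × Int) → Int
  | [] => 0
  | kv :: t => (if p kv.1 then kv.2 else 0) + catSum p t

theorem catSum_congr (p q : Int → Prop) [DecidablePred p] [DecidablePred q]
    (h : ∀ y, p y ↔ q y) : ∀ l, catSum p l = catSum q l := by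
  intro l; induction l with
  | nil => rfl
  | cons kv t ih => simp [catSum, ih, if_congr (h kv.1) rfl rfl]

theorem catSum_of_not_mem (k : Int) (l : List (Int × Int))
    (h : k ∉ l.map Prod.fst) : catSum (fun y => y = k) l = 0 := by
  induction l with
  | nil => rfl
  | cons kv t ih =>
    simp only [List.map_cons, List.mem_cons, not_or] at h
    have hne : ¬ kv.1 = k := fun hk => h.1 hk.symm
    simp [catSum, ih h.2, hne]

theorem lookup_getD_eq_catSum (l : List (Int × Int)) (hl : (l.map Prod.fst).Nodup)
    (k : Int) : (l.lookup k).getD 0 = catSum (fun y => y = k) l := by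
  induction l with
  | nil => rfl
  | cons kv t ih =>
    simp only [List.map_cons, List.nodup_cons] at hl
    by_cases h : kv.1 = k
    · subst h
      simp [List.lookup, catSum, catSum_of_not_mem kv.1 t hl.1]
    · have hbe : (k == kv.1) = false := by simp [Ne.symm h]
      simp [List.lookup, hbe, catSum, h, ih hl.2]

theorem foldA_range (l : List (Int × Int)) (R : List Int) (a : Int) :
    R.foldl (fun acc state => if (l.lookup state).isSome
                      then acc + (l.lookup state).getD 0 else acc) a
      = a + (R.map (fun x => (l.lookup x).getD 0)).sum := by
  induction R generalizing a with
  | nil => simp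
  | cons x t ih =>
    rw [List.foldl_cons, ih, List.map_cons, List.sum_cons]
    cases h : l.lookup x
    · simp [h]
    · simp [h]; ring

theorem sum_ite_eq_mem (k v : Int) (R : List Int) (hR : R.Nodup) :
    (R.map (fun x => if k = x then v else 0)).sum = if k ∈ R then v else 0 := by
  induction R with
  | nil => simp
  | cons x t ih =>
    simp only [List.nodup_cons] at hR
    by_cases h : k = x
    · subst h
      simp [ih hR.2, hR.1]
    · simp [h, ih hR.2]

theorem sum_catSum_single (R : List Int) (hR : R.Nodup) (l : List (Int × Int)) :
    (R.map (fun x => catSum (fun y => y = x) l)).sum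
      = catSum (fun y => y ∈ R) l := by
  induction l with
  | nil => simp [catSum]
  | cons kv t ih =>
    have key : ∀ (R' : List Int), (R'.map (fun x => catSum (fun y => y = x) (kv :: t))).sum
        = (R'.map (fun x => if kv.1 = x then kv.2 else 0)).sum
          + (R'.map (fun x => catSum (fun y => y = x) t)).sum := by
      intro R'
      induction R' with
      | nil => simp
      | cons z s ihr =>
        simp only [List.map_cons, List.sum_cons]
        rw [ihr]
        simp only [catSum]
        ring
    rw [key R, ih, sum_ite_eq_mem kv.1 kv.2 R hR]
    simp [catSum]

theorem altFold (l : List (Int × Int)) (s i k r d w : Int) :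
    l.foldl bStep (s, i, k, r, d, w) =
      (s + catSum (fun y => y = 0) l,
       i + catSum (fun y => 1 ≤ y ∧ y < 8) l,
       k + catSum (fun y => 8 ≤ y ∧ y < 16) l,
       r + catSum (fun y => y = 16) l,
       d + catSum (fun y => y = -1) l,
       w + catSum (fun y => y = -10) l) := by
  induction l generalizing s i k r d w with
  | nil => simp [catSum]
  | cons kv t ih =>
    simp only [List.foldl_cons, bStep]
    split_ifs with h1 h2 h3 h4 h5 h6 <;>
      (rw [ih]; simp only [catSum, Prod.mk.injEq]; refine ⟨?_, ?_, ?_, ?_, ?_, ?_⟩ <;>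
        (split_ifs <;> omega))

theorem pyRange_1_8_nodup : (PySem.List.pyRange 1 8 1).Nodup :=
  PySem.List.nodup_pyRange_one 1 8
theorem pyRange_8_16_nodup : (PySem.List.pyRange 8 16 1).Nodup :=
  PySem.List.nodup_pyRange_one 8 16

theorem range_slot (l : List (Int × Int)) (hl : (l.map Prod.fst).Nodup)
    (a b : Int) (hnd : (PySem.List.pyRange a b 1).Nodup) :
    ((PySem.List.pyRange a b 1).map (fun x => (l.lookup x).getD 0)).sum
      = catSum (fun y => a ≤ y ∧ y < b) l := by
  have h1 : ∀ x ∈ PySem.List.pyRange a b 1,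
      (l.lookup x).getD 0 = catSum (fun y => y = x) l := fun x _ =>
    lookup_getD_eq_catSum l hl x
  rw [List.map_congr_left h1, sum_catSum_single _ hnd l]
  exact catSum_congr _ _ (fun y => by rw [PySem.List.mem_pyRange_one]) l

-- ===== VERDICT (by name: the statement is the Claim_ definition above) =====
theorem dict_to_states_row_spec : Claim_equal_dict_to_states_row := by
  intro l _ hpre
  unfold Spec_dict_to_states_row dict_to_states_row dict_to_states_row_alt
  rw [altFold]
  simp only [List.foldl_cons, List.foldl_nil, foldA_range, zero_add]
  rw [range_slot l hpre 1 8 pyRange_1_8_nodup,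
      range_slot l hpre 8 16 pyRange_8_16_nodup,
      lookup_getD_eq_catSum l hpre 0,
      lookup_getD_eq_catSum l hpre 16,
      lookup_getD_eq_catSum l hpre (-1),
      lookup_getD_eq_catSum l hpre (-10)]
  simp
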